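-- pv_equiv track=rewrite | github.com/LKS-CHART/CHARTextract | util/ASTOps.py | _insertOperators
-- ===== SOURCE A (Python) =====
-- def _insertOperators(tags):
--     new_tags = []
--     operators = {"OR", "..."}
--
--     for i, tag in enumerate(tags):
--         if (i + 1) < len(tags) and (tag not in operators and tags[i + 1] not in operators):
--             new_tags.append(tag)
--             new_tags.append("...")
--         else:
--             new_tags.append(tag)
--
--     return new_tags
-- ===== SOURCE B (Python) =====
-- def _insertOperators(tags):
--     operators = {"OR", "..."}
--     out = []
--     run = []  # current maximal run of consecutive non-operator tags
--
--     def flush():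
--         if run:
--             out.extend(x for t in run for x in (t, "..."))
--             out.pop()
--             run.clear()
--
--     for t in tags:
--         if t in operators:
--             flush()
--             out.append(t)
--         else:
--             run.append(t)
--     flush()
--     return out
-- ===== Notes on version B (the rewrite author's own statement) =====
-- stated objective: alternative
-- what changed: B groups the tags into maximal runs of consecutive non-operator tags and emits each run by flattening (t, '...') pairs and popping the trailing '...', with operators flushed between runs, replacing A's per-index lookahead tags[i+1] test.
import Mathlib
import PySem

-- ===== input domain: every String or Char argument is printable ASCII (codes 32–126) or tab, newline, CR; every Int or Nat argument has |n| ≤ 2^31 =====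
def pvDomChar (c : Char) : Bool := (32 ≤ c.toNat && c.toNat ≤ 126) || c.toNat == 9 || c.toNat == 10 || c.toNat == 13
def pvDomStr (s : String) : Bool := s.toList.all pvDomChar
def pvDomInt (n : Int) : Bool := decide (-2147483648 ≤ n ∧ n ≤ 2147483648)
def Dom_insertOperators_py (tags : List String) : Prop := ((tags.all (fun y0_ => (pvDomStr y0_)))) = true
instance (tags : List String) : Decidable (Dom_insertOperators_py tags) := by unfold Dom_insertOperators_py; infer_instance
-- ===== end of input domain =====

-- B replaces A's index loop with lookahead tags[i+1] by a run-based pass: maximal runs of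
-- non-operator tags are flushed with "..." interleaved (flatten pairs, pop the trailing "...");
-- an alternative decomposition of the same cost (return value only).

-- membership in the set {"OR", "..."} (shared helper)
def pvIsOp (t : String) : Bool := t ∈ PySem.Set.ofList ["OR", "..."]

-- ===== PORT A =====
def pvStepA (tags : List String) (acc : List String) (p : Int × String) : List String :=
  if p.1 + 1 < (tags.length : Int) ∧ ¬pvIsOp p.2 ∧ ¬pvIsOp (PySem.List.pyGetD tags (p.1 + 1) "") then
    acc ++ [p.2] ++ ["..."]
  else
    acc ++ [p.2]

def insertOperators_py (tags : List String) : List String :=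
  (PySem.List.enumerate tags 0).foldl (pvStepA tags) []

-- ===== PORT B =====
-- B's flush(): extend out with the flattened (t, "...") pairs of the run, then pop the last "..."
def pvInterleave (run : List String) : List String :=
  (run.flatMap (fun t => [t, "..."])).dropLast

-- B's loop body: operators flush the pending run and are appended; other tags extend the run
def pvStepB (s : List String × List String) (t : String) : List String × List String :=
  if pvIsOp t then (s.1 ++ pvInterleave s.2 ++ [t], []) else (s.1, s.2 ++ [t])

def insertOperators_py_alt (tags : List String) : List String :=
  let s := tags.foldl pvStepB ([], [])
  s.1 ++ pvInterleave s.2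

-- ===== PRECONDITION & SPEC =====
def Spec_insertOperators_py (tags : List String) (out : List String) : Prop := out = insertOperators_py_alt tags
instance (tags : List String) (out : List String) : Decidable (Spec_insertOperators_py tags out) := by unfold Spec_insertOperators_py; infer_instance

-- ===== CLAIM (what is proved, stated in full; the proofs are below) =====
def Claim_equal_insertOperators_py : Prop := ∀ (tags : List String), Dom_insertOperators_py tags → Spec_insertOperators_py tags (insertOperators_py tags)

-- ===== LEMMAS AND PROOFS =====

-- proof-only intermediate: the pairwise characterisation of the result
def pvAltGo : List String → List String
  | [] => []
  | [a] => [a]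
  | a :: b :: rest =>
    (if ¬pvIsOp a ∧ ¬pvIsOp b then [a, "..."] else [a]) ++ pvAltGo (b :: rest)

theorem pvFoldA_eq (tags : List String) :
    ∀ (l : List String) (k : Nat), tags.drop k = l →
      ∀ (acc : List String),
        (PySem.List.enumerate l (k : Int)).foldl (pvStepA tags) acc = acc ++ pvAltGo l := by
  intro l
  induction l with
  | nil => intro k _ acc; simp [PySem.List.enumerate, pvAltGo]
  | cons a l ih =>
    intro k hdrop acc
    have hlen : tags.length = k + 1 + l.length := by
      have h := congrArg List.length hdrop
      rw [List.length_drop] at h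
      have hk : k ≤ tags.length := by
        by_contra hc
        rw [List.drop_eq_nil_of_le (by omega)] at hdrop
        exact (List.cons_ne_nil a l) hdrop.symm
      simp at h
      omega
    have hdrop' : tags.drop (k + 1) = l := by
      have h : tags.drop (k + 1) = (tags.drop k).drop 1 := by
        rw [List.drop_drop]
      rw [h, hdrop]; simp
    have hget : PySem.List.pyGetD tags ((k : Int) + 1) "" = l.headD "" := by
      have hc : ((k : Int) + 1) = ((k + 1 : Nat) : Int) := by push_cast; ring
      rw [hc, PySem.List.pyGetD_natCast, ← hdrop']
      simp [List.getD, List.headD_eq_head?_getD, List.head?_drop]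
    rw [PySem.List.enumerate_cons, List.foldl_cons]
    cases l with
    | nil =>
      have hstep : pvStepA tags acc ((k : Int), a) = acc ++ [a] := by
        unfold pvStepA
        rw [if_neg]
        rintro ⟨h1, -⟩
        rw [hlen] at h1
        push_cast [List.length_nil] at h1
        omega
      rw [hstep]
      simp [PySem.List.enumerate, pvAltGo]
    | cons b l' =>
      have hcond : ((k : Int) + 1 < (tags.length : Int) ∧ ¬pvIsOp a ∧ ¬pvIsOp (PySem.List.pyGetD tags ((k : Int) + 1) "")) ↔ (¬pvIsOp a ∧ ¬pvIsOp b) := by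
        rw [hget]
        simp only [List.headD_cons]
        constructor
        · rintro ⟨-, h2, h3⟩; exact ⟨h2, h3⟩
        · rintro ⟨h2, h3⟩
          refine ⟨?_, h2, h3⟩
          rw [hlen]; push_cast [List.length_cons]; omega
      have hih := ih (k + 1) hdrop' (pvStepA tags acc ((k : Int), a))
      push_cast at hih
      rw [hih]
      unfold pvStepA
      by_cases h : ¬pvIsOp a ∧ ¬pvIsOp b
      · rw [if_pos (hcond.mpr h)]
        simp [pvAltGo, h]
      · rw [if_neg (fun hc => h (hcond.mp hc)),
          show pvAltGo (a :: b :: l') = (if ¬pvIsOp a ∧ ¬pvIsOp b then [a, "..."] else [a]) ++ pvAltGo (b :: l') from rfl,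
          if_neg h]
        simp

-- flatMap of a nonempty run ends in "..."
theorem pvFlatLast : ∀ (run : List String), run ≠ [] →
    run.flatMap (fun t => [t, "..."]) = (run.flatMap (fun t => [t, "..."])).dropLast ++ ["..."] := by
  intro run
  induction run with
  | nil => intro h; exact absurd rfl h
  | cons a r ih =>
    intro _
    cases r with
    | nil => simp
    | cons b r' =>
      have hne : (b :: r').flatMap (fun t => [t, "..."]) ≠ [] := by simp
      rw [List.flatMap_cons]
      rw [List.dropLast_append_of_ne_nil hne]
      rw [List.append_assoc, ← ih (by simp)]

theorem pvInterleave_snoc (run : List String) (t : String) (h : run ≠ []) :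
    pvInterleave (run ++ [t]) = pvInterleave run ++ ["...", t] := by
  unfold pvInterleave
  rw [List.flatMap_append, List.flatMap_cons, List.flatMap_nil]
  have h2 : run.flatMap (fun t => [t, "..."]) ++ ([t, "..."] ++ []) =
      (run.flatMap (fun t => [t, "..."]) ++ [t]) ++ ["..."] := by simp
  rw [h2, List.dropLast_concat]
  rw [pvFlatLast run h]
  simp

-- the trailing part of B's state after processing l with pending run
def pvTail (run l : List String) : List String :=
  match l with
  | [] => []
  | b :: _ => if run ≠ [] ∧ pvIsOp b = false then "..." :: pvAltGo l else pvAltGo l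

theorem pvConsTail (t : String) (rest run' : List String) (h : run' ≠ []) (ht : pvIsOp t = false) :
    t :: pvTail run' rest = pvAltGo (t :: rest) := by
  cases rest with
  | nil => simp [pvTail, pvAltGo]
  | cons c r =>
    by_cases hc : pvIsOp c = false
    · simp [pvTail, pvAltGo, h, ht, hc]
    · simp [pvTail, pvAltGo, ht, hc]

theorem pvOpTail (t : String) (rest : List String) (ht : pvIsOp t = true) :
    t :: pvTail ([] : List String) rest = pvAltGo (t :: rest) := by
  cases rest with
  | nil => simp [pvTail, pvAltGo]
  | cons c r => simp [pvTail, pvAltGo, ht]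

theorem pvFoldB_eq : ∀ (l out run : List String),
    (l.foldl pvStepB (out, run)).1 ++ pvInterleave (l.foldl pvStepB (out, run)).2 =
      out ++ pvInterleave run ++ pvTail run l := by
  intro l
  induction l with
  | nil => intro out run; simp [pvTail]
  | cons t rest ih =>
    intro out run
    rw [List.foldl_cons]
    by_cases ht : pvIsOp t = true
    · have hstep : pvStepB (out, run) t = (out ++ pvInterleave run ++ [t], []) := by
        simp [pvStepB, ht]
      rw [hstep, ih]
      have htail : pvTail run (t :: rest) = pvAltGo (t :: rest) := by
        simp [pvTail, ht]
      rw [htail, ← pvOpTail t rest ht]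
      simp [pvInterleave]
    · have ht' : pvIsOp t = false := by simpa using ht
      have hstep : pvStepB (out, run) t = (out, run ++ [t]) := by
        simp [pvStepB, ht']
      rw [hstep, ih]
      by_cases hr : run = []
      · subst hr
        have htail : pvTail ([] : List String) (t :: rest) = pvAltGo (t :: rest) := by
          simp [pvTail]
        rw [htail]
        have hint : pvInterleave [t] = [t] := by simp [pvInterleave]
        rw [List.nil_append, hint, ← pvConsTail t rest [t] (by simp) ht']
        simp [pvInterleave]
      · have htail : pvTail run (t :: rest) = "..." :: pvAltGo (t :: rest) := by
          simp [pvTail, hr, ht']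
        rw [htail, pvInterleave_snoc run t hr, ← pvConsTail t rest (run ++ [t]) (by simp) ht']
        simp

theorem pvB_eq_go (tags : List String) : insertOperators_py_alt tags = pvAltGo tags := by
  unfold insertOperators_py_alt
  rw [pvFoldB_eq tags [] []]
  cases tags with
  | nil => simp [pvTail, pvInterleave, pvAltGo]
  | cons t rest => simp [pvTail, pvInterleave]

-- ===== VERDICT (by name: the statement is the Claim_ definition above) =====
theorem insertOperators_py_spec : Claim_equal_insertOperators_py := by
  intro tags _
  unfold Spec_insertOperators_py insertOperators_py
  rw [pvB_eq_go]
  exact pvFoldA_eq tags tags 0 (by simp) []
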